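-- pv_equiv track=rewrite | github.com/bansikumarujeniya/python_learnings | str.py | count_in_string
-- ===== SOURCE A (Python) =====
-- def count_in_string(ch,idx,s):
--     if idx == len(s):
--         return 0
--
--     count = 0
--
--     if s[idx] == ch:
--         count += 1
--
--     count += count_in_string(ch,idx+1,s)
--
--     return count
-- ===== SOURCE B (Python) =====
-- def count_in_string(ch, idx, s):
--     # B: iterative for-loop over range(idx, len(s)) with an accumulator (no recursion).
--     count = 0
--     for i in range(idx, len(s)):
--         if s[i] == ch:
--             count += 1
--     return count
-- ===== Notes on version B (the rewrite author's own statement) =====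
-- stated objective: idiomatic
-- what changed: Replaced the non-tail recursion (1 + recursive call per character) by an iterative for-loop over range(idx, len(s)) with a count accumulator, avoiding Python recursion-depth limits.
import Mathlib
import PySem

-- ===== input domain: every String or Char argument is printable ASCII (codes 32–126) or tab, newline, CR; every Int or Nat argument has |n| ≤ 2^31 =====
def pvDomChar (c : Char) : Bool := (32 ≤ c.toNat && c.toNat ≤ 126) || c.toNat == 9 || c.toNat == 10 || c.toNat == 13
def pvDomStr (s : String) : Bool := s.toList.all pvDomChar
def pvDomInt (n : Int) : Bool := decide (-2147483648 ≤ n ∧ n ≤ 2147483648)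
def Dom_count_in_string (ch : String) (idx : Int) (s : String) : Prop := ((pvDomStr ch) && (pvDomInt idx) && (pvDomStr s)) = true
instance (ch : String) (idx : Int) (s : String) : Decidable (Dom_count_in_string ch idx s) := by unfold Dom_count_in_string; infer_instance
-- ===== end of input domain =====

-- B replaces A's non-tail recursion by a for-loop over range(idx, len(s)) with an accumulator (same traversal, same values).


-- ===== PORT A =====
-- A's recursion; the out-of-range branch (returning 0) is Python's IndexError, excluded by Pre_.
def countA (ch : List Char) (idx : Int) (s : List Char) : Int :=
  if idx = (s.length : Int) then 0
  else if hin : PySem.Raise.InRange s.length idx then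
    (if [PySem.List.pyGetD s idx 'a'] = ch then 1 else 0) + countA ch (idx + 1) s
  else 0
termination_by ((s.length : Int) - idx).toNat
decreasing_by
  unfold PySem.Raise.InRange at hin
  omega

def count_in_string (ch : String) (idx : Int) (s : String) : Int :=
  countA ch.toList idx s.toList

-- ===== PORT B =====
-- B's for-loop: fold the accumulator over range(idx, len(s)); s[i] is pyGetD (IndexError excluded by Pre_).
def count_in_string_alt (ch : String) (idx : Int) (s : String) : Int :=
  (PySem.List.pyRange idx (s.toList.length : Int) 1).foldl
    (fun count i => if [PySem.List.pyGetD s.toList i 'a'] = ch.toList then count + 1 else count) 0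

-- ===== PRECONDITION & SPEC =====
-- Pre_ excludes exactly the inputs where Python A raises IndexError: idx must stay within -len(s) .. len(s).
def Pre_count_in_string (ch : String) (idx : Int) (s : String) : Prop :=
  -(s.toList.length : Int) ≤ idx ∧ idx ≤ (s.toList.length : Int)
instance (ch : String) (idx : Int) (s : String) : Decidable (Pre_count_in_string ch idx s) := by unfold Pre_count_in_string; infer_instance

def pvWitness_count_in_string : String × Int × String := ("a", 1, "banana")

def Spec_count_in_string (ch : String) (idx : Int) (s : String) (out : Int) : Prop := out = count_in_string_alt ch idx s
instance (ch : String) (idx : Int) (s : String) (out : Int) : Decidable (Spec_count_in_string ch idx s out) := by unfold Spec_count_in_string; infer_instance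

-- ===== CLAIM (what is proved, stated in full; the proofs are below) =====
def Claim_equal_count_in_string : Prop := ∀ (ch : String) (idx : Int) (s : String), Dom_count_in_string ch idx s → Pre_count_in_string ch idx s → Spec_count_in_string ch idx s (count_in_string ch idx s)

-- ===== LEMMAS AND PROOFS =====

-- A's recursion computes the per-index count over range(idx, len s), for every idx in A's domain.
theorem countA_eq_countP (ch : List Char) (s : List Char) (idx : Int)
    (h1 : -(s.length : Int) ≤ idx) (h2 : idx ≤ (s.length : Int)) :
    countA ch idx s =
      ((PySem.List.pyRange idx (s.length : Int) 1).countP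
        (fun i => decide ([PySem.List.pyGetD s i 'a'] = ch)) : Int) := by
  fun_induction countA ch idx s with
  | case1 =>
    simp [PySem.List.pyRange_one_eq_nil (le_refl _)]
  | case2 idx h hin ih =>
    have hlt : idx < (s.length : Int) := lt_of_le_of_ne h2 h
    rw [ih (by omega) (by omega), PySem.List.pyRange_one_cons hlt, List.countP_cons]
    by_cases hc : [PySem.List.pyGetD s idx 'a'] = ch <;> simp [hc] <;> omega
  | case3 idx h hnin =>
    exfalso
    unfold PySem.Raise.InRange at hnin
    omega

-- ===== VERDICT (by name: the statement is the Claim_ definition above) =====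
theorem count_in_string_spec : Claim_equal_count_in_string := by
  intro ch idx s _ hpre
  unfold Spec_count_in_string count_in_string count_in_string_alt
  rw [countA_eq_countP ch.toList s.toList idx hpre.1 hpre.2, PySem.List.foldl_ite_add_one]
  simp
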